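-- pv_equiv track=rewrite | github.com/Lanch3ros/MiPrimerRepo | T13/T13.1 Lancheros Ayora José Luis.py | c_imp_prod_pares
-- ===== SOURCE A (Python) =====
-- def c_imp_prod_pares (numeros, cn):
--     c_impares = 0
--     p_pares = 1
--     for i in range (cn):
--         if numeros[i] % 2 == 0:
--             p_pares *= numeros[i]
--         else:
--             c_impares += 1
--     if c_impares == cn:
--         p_pares = 0
--
--     return c_impares, p_pares
-- ===== SOURCE B (Python) =====
-- def _solve(seg):
--     if len(seg) <= 1:
--         if not seg:
--             return 0, None
--         v = seg[0]
--         return (0, v) if v % 2 == 0 else (1, None)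
--     m = len(seg) // 2
--     c1, p1 = _solve(seg[:m])
--     c2, p2 = _solve(seg[m:])
--     if p1 is None:
--         p = p2
--     elif p2 is None:
--         p = p1
--     else:
--         p = p1 * p2
--     return c1 + c2, p
--
--
-- def c_imp_prod_pares(numeros, cn):
--     pref = [numeros[i] for i in range(cn)]
--     c, p = _solve(pref)
--     return c, (0 if p is None else p)
-- ===== Notes on version B (the rewrite author's own statement) =====
-- stated objective: alternative
-- what changed: B replaces A's single accumulator loop with a divide-and-conquer: it splits the prefix in halves, recursively combines (odd-count, optional even-product) pairs, and uses the Option product (None = no even seen) instead of A's post-hoc c_impares == cn check.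
-- outside the precondition, e.g. on c_imp_prod_pares([], -1): A returns (0, 1), B returns (0, 0)
import Mathlib
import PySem

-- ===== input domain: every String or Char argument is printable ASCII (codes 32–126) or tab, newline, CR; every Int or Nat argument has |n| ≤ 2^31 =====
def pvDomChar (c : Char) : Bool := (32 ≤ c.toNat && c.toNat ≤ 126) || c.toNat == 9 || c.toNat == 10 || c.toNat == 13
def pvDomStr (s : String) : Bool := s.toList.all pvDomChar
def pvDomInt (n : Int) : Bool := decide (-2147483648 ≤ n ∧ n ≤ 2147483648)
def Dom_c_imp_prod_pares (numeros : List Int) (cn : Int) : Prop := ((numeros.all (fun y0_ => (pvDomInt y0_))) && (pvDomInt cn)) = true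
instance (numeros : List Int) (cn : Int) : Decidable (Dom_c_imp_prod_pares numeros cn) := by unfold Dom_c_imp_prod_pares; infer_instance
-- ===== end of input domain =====

-- B recomputes the same pair by divide-and-conquer over the prefix, merging
-- (odd-count, optional even-product) pairs — alternative decomposition, same cost; return value only.

-- ===== PORT A =====
def c_imp_prod_pares (numeros : List Int) (cn : Int) : Int × Int :=
  let s := (PySem.List.pyRange 0 cn 1).foldl
    (fun (st : Int × Int) i =>
      let v := (PySem.List.pyGet? numeros i).getD 0   -- numeros[i]; in range under Pre_
      if PySem.Int.mod v 2 = 0 then (st.1, st.2 * v) else (st.1 + 1, st.2))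
    (0, 1)
  if s.1 = cn then (s.1, 0) else s

-- ===== PORT B =====
-- _solve: divide and conquer over the segment, exactly as in Source B
def pvSolve (seg : List Int) : Int × Option Int :=
  if h : seg.length ≤ 1 then
    match seg with
    | [] => (0, none)
    | v :: _ => if PySem.Int.mod v 2 = 0 then (0, some v) else (1, none)
  else
    let m := seg.length / 2
    let r1 := pvSolve (seg.take m)
    let r2 := pvSolve (seg.drop m)
    let p := match r1.2, r2.2 with
      | none, p2 => p2
      | some a, none => some a
      | some a, some b => some (a * b)
    (r1.1 + r2.1, p)
termination_by seg.length
decreasing_by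
  · simp only [List.length_take]; omega
  · simp only [List.length_drop]; omega

def c_imp_prod_pares_alt (numeros : List Int) (cn : Int) : Int × Int :=
  let pref := (PySem.List.pyRange 0 cn 1).map
    (fun i => (PySem.List.pyGet? numeros i).getD 0)   -- numeros[i]; in range under Pre_
  let r := pvSolve pref
  (r.1, r.2.getD 0)

-- ===== PRECONDITION & SPEC =====
-- Pre_ restricts to the natural domain of a prefix count: 0 ≤ cn (Python A returns (0,1) for
-- negative cn, an accident outside the task's natural domain) and cn ≤ len(numeros) (beyond
-- which A raises IndexError, and so does B).
def Pre_c_imp_prod_pares (numeros : List Int) (cn : Int) : Prop :=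
  0 ≤ cn ∧ cn ≤ (numeros.length : Int)
instance (numeros : List Int) (cn : Int) : Decidable (Pre_c_imp_prod_pares numeros cn) := by
  unfold Pre_c_imp_prod_pares; infer_instance

def pvWitness_c_imp_prod_pares : List Int × Int := ([3, 4, 5, 6], 4)

def Spec_c_imp_prod_pares (numeros : List Int) (cn : Int) (out : Int × Int) : Prop := out = c_imp_prod_pares_alt numeros cn
instance (numeros : List Int) (cn : Int) (out : Int × Int) : Decidable (Spec_c_imp_prod_pares numeros cn out) := by unfold Spec_c_imp_prod_pares; infer_instance

-- ===== CLAIM (what is proved, stated in full; the proofs are below) =====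
def Claim_equal_c_imp_prod_pares : Prop := ∀ (numeros : List Int) (cn : Int), Dom_c_imp_prod_pares numeros cn → Pre_c_imp_prod_pares numeros cn → Spec_c_imp_prod_pares numeros cn (c_imp_prod_pares numeros cn)

-- ===== LEMMAS AND PROOFS =====

def pvEvens (xs : List Int) : List Int := xs.filter (fun v => decide (PySem.Int.mod v 2 = 0))
def pvOdds (xs : List Int) : Int := ((xs.filter (fun v => !decide (PySem.Int.mod v 2 = 0))).length : Int)
def pvProd (xs : List Int) : Int := xs.foldl (· * ·) 1

theorem foldl_mul_shift (l : List Int) (a : Int) :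
    l.foldl (· * ·) a = a * l.foldl (· * ·) 1 := by
  induction l generalizing a with
  | nil => simp
  | cons v t ih =>
    simp only [List.foldl_cons]
    rw [ih (a * v), ih (1 * v)]
    ring

theorem pvProd_append (a b : List Int) : pvProd (a ++ b) = pvProd a * pvProd b := by
  unfold pvProd
  rw [List.foldl_append, foldl_mul_shift]

-- characterisation of B's divide-and-conquer
theorem pvSolve_char (seg : List Int) :
    pvSolve seg = (pvOdds seg,
      if pvEvens seg = [] then none else some (pvProd (pvEvens seg))) := by
  induction seg using pvSolve.induct with
  | case1 =>
    rw [pvSolve]; simp [pvOdds, pvEvens]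
  | case2 v t h hv =>
    have ht : t = [] := by cases t <;> simp_all
    subst ht
    rw [pvSolve]
    rw [dif_pos h]
    show (if PySem.Int.mod v 2 = 0 then ((0 : Int), some v) else (1, none)) = _
    rw [if_pos hv]
    have hd : decide (PySem.Int.mod v 2 = 0) = true := decide_eq_true hv
    simp only [pvOdds, pvEvens, pvProd, List.filter_cons, List.filter_nil, hd,
      Bool.not_true, if_true, if_false, List.length_nil, List.foldl_cons, List.foldl_nil]
    norm_num
  | case3 v t h hv =>
    have ht : t = [] := by cases t <;> simp_all
    subst ht
    rw [pvSolve]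
    rw [dif_pos h]
    show (if PySem.Int.mod v 2 = 0 then ((0 : Int), some v) else (1, none)) = _
    rw [if_neg hv]
    have hd : decide (PySem.Int.mod v 2 = 0) = false := decide_eq_false hv
    simp only [pvOdds, pvEvens, pvProd, List.filter_cons, List.filter_nil, hd,
      Bool.not_false, if_true, if_false, List.length_cons, List.length_nil]
    norm_num
  | case4 seg h m ih1 ih2 =>
    rw [pvSolve]
    simp only [dif_neg h]
    rw [ih1, ih2]
    have hsplit : seg = seg.take m ++ seg.drop m := (List.take_append_drop _ _).symm
    have hev : pvEvens seg = pvEvens (seg.take m) ++ pvEvens (seg.drop m) := by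
      conv_lhs => rw [hsplit]
      simp only [pvEvens, List.filter_append]
    have hod : pvOdds seg = pvOdds (seg.take m) + pvOdds (seg.drop m) := by
      conv_lhs => rw [hsplit]
      simp only [pvOdds, List.filter_append, List.length_append]
      push_cast
      ring
    rw [hev, hod]
    by_cases h1 : pvEvens (seg.take m) = []
    · simp [h1]
    · by_cases h2 : pvEvens (seg.drop m) = []
      · simp [h1, h2, pvProd_append, pvProd]
      · have hne : pvEvens (seg.take m) ++ pvEvens (seg.drop m) ≠ [] := by
          simp [h1]
        simp [h1, h2, hne, pvProd_append]

-- characterisation of A's loop body as a fold over the elements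
theorem foldl_step_char (xs : List Int) (c p : Int) :
    xs.foldl
      (fun (st : Int × Int) v =>
        if PySem.Int.mod v 2 = 0 then (st.1, st.2 * v) else (st.1 + 1, st.2))
      (c, p)
    = (c + pvOdds xs, p * pvProd (pvEvens xs)) := by
  induction xs generalizing c p with
  | nil => simp [pvOdds, pvEvens, pvProd]
  | cons v t ih =>
    simp only [List.foldl_cons]
    by_cases hv : PySem.Int.mod v 2 = 0
    · simp only [hv, if_pos, ih]
      simp only [pvEvens, pvOdds, List.filter_cons, hv, decide_true, Bool.not_true, if_true]
      simp only [Prod.ext_iff]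
      constructor
      · rfl
      · show p * v * pvProd _ = p * pvProd (v :: _)
        simp only [pvProd, List.foldl_cons]
        rw [foldl_mul_shift _ (1 * v)]
        ring
    · simp only [hv, if_neg, reduceIte, ih]
      simp only [pvEvens, pvOdds, List.filter_cons, hv, decide_false, Bool.not_false, List.length_cons]
      simp only [Prod.ext_iff]
      constructor
      · push_cast [List.length_cons]; ring
      · rfl

theorem pvOdds_add_evens (xs : List Int) :
    pvOdds xs + ((pvEvens xs).length : Int) = (xs.length : Int) := by
  unfold pvOdds pvEvens
  induction xs with
  | nil => simp
  | cons v t ih =>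
    rcases Bool.eq_false_or_eq_true (decide (PySem.Int.mod v 2 = 0)) with hd | hd <;>
      simp only [List.filter_cons, hd, Bool.not_false, Bool.not_true, if_true, if_false,
        List.length_cons, Bool.false_eq_true, Bool.true_eq_false] <;>
      push_cast <;> omega

-- A's index fold, characterised over the mapped prefix
theorem loopA_char (numeros : List Int) (l : List Int) (c p : Int) :
    l.foldl
      (fun (st : Int × Int) i =>
        let v := (PySem.List.pyGet? numeros i).getD 0
        if PySem.Int.mod v 2 = 0 then (st.1, st.2 * v) else (st.1 + 1, st.2))
      (c, p)
    = (c + pvOdds (l.map (fun i => (PySem.List.pyGet? numeros i).getD 0)),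
       p * pvProd (pvEvens (l.map (fun i => (PySem.List.pyGet? numeros i).getD 0)))) := by
  rw [← foldl_step_char]
  rw [List.foldl_map]

-- ===== VERDICT (by name: the statement is the Claim_ definition above) =====
theorem c_imp_prod_pares_spec : Claim_equal_c_imp_prod_pares := by
  intro numeros cn _ hpre
  obtain ⟨h0, _⟩ := hpre
  unfold Spec_c_imp_prod_pares c_imp_prod_pares c_imp_prod_pares_alt
  simp only [loopA_char, pvSolve_char]
  set pref := (PySem.List.pyRange 0 cn 1).map
    (fun i => (PySem.List.pyGet? numeros i).getD 0) with hpref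
  have hlen : ((pref.length : Int)) = cn := by
    rw [hpref, List.length_map, PySem.List.length_pyRange_one]
    omega
  have hsum := pvOdds_add_evens pref
  by_cases hemp : pvEvens pref = []
  · have hcn : pvOdds pref = cn := by rw [hemp] at hsum; simpa [hlen] using hsum
    simp [hemp, hcn]
  · have hlp : 0 < ((pvEvens pref).length : Int) := by
      have := List.length_pos_of_ne_nil hemp
      exact_mod_cast this
    have hcond : ¬ (pvOdds pref = cn) := by omega
    simp [hemp, hcond]
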